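-- pv_equiv track=rewrite | github.com/Ace1928/eidosian_forge | archive_forge/src/archive_forge/func_prodpow.py | prodpow
-- ===== SOURCE A (Python) =====
-- def prodpow(bases, exponents):
--     """
--         Examples
--         --------
--         >>> prodpow([2, 3], [[0, 1], [1, 2]])
--         [3, 18]
--
--         """
--     result = []
--     for row in exponents:
--         res = 1
--         for b, e in zip(bases, row):
--             res *= b ** e
--         result.append(res)
--     return result
-- ===== SOURCE B (Python) =====
-- def prodpow(bases, exponents):
--     result = [1] * len(exponents)
--     width = min(len(bases), max(map(len, exponents), default=0))
--     for j in range(width):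
--         b = bases[j]
--         for i in range(len(exponents)):
--             row = exponents[i]
--             if j < len(row):
--                 result[i] *= b ** row[j]
--     return result
-- ===== Notes on version B (the rewrite author's own statement) =====
-- stated objective: alternative
-- what changed: Column-major accumulation: B keeps a vector of partial products (one per row) and sweeps over base positions, multiplying into each row's slot, instead of A's row-major scalar reduction via zip.
-- outside the precondition, e.g. on prodpow([2], [[-1]]): A returns [0.5], B returns [0.5]; on prodpow([0], [[-1]]): A raises ZeroDivisionError, B raises ZeroDivisionError
import Mathlib
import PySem

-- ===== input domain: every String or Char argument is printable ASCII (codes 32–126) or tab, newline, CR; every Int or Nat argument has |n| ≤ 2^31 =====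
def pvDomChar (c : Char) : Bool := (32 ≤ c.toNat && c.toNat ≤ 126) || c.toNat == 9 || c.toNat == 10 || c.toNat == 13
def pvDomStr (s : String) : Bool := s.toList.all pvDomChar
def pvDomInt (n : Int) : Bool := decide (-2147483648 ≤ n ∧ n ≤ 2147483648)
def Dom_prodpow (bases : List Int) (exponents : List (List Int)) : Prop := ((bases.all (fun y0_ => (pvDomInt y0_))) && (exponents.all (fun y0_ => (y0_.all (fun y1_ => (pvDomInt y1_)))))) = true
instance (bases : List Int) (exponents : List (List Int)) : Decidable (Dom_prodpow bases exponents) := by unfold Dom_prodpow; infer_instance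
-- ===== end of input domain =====

-- B replaces A's row-major scalar reduction by a column-major sweep maintaining a vector of
-- partial products (objective: alternative decomposition, same cost).

-- ===== PORT A =====
-- result = []; for row: res = 1; for b,e in zip(bases,row): res *= b**e; result.append(res)
-- b ** e is ported as b ^ e.toNat, exact since Pre_ requires the used exponents nonnegative.
def prodpow (bases : List Int) (exponents : List (List Int)) : List Int :=
  exponents.foldl
    (fun result row =>
      result ++ [(bases.zip row).foldl (fun res p => res * p.1 ^ p.2.toNat) 1])
    []

-- ===== PORT B =====
-- result = [1]*len(exponents); width = min(len(bases), max(map(len, exponents), default=0));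
-- for j in range(width): for each row i: if j < len(row): result[i] *= bases[j] ** row[j].
-- max(map(len, exponents), default=0) is the foldl below (exact: lengths are >= 0); the inner
-- index loop over i is ported as a map over result zipped with exponents (they always have
-- equal length); bases[j] / row[j] with j in range are List.getD (exact).
def prodpow_alt (bases : List Int) (exponents : List (List Int)) : List Int :=
  (List.range (min bases.length (exponents.foldl (fun m row => max m row.length) 0))).foldl
    (fun result j =>
      (result.zip exponents).map
        (fun p => if j < p.2.length then p.1 * (bases.getD j 0) ^ ((p.2.getD j 0).toNat) else p.1))
    (exponents.map (fun _ => (1 : Int)))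

-- ===== PRECONDITION & SPEC =====
-- Pre_ excludes inputs where some exponent actually consumed by zip is negative: there
-- Python's ** returns a float (or raises ZeroDivisionError for base 0), i.e. A returns
-- no value of the declared List int type.
def Pre_prodpow (bases : List Int) (exponents : List (List Int)) : Prop :=
  ∀ row ∈ exponents, ∀ e ∈ row.take bases.length, 0 ≤ e
instance (bases : List Int) (exponents : List (List Int)) : Decidable (Pre_prodpow bases exponents) := by
  unfold Pre_prodpow; infer_instance

def pvWitness_prodpow : List Int × List (List Int) := ([2, 3], [[0, 1], [1, 2]])

def Spec_prodpow (bases : List Int) (exponents : List (List Int)) (out : List Int) : Prop := out = prodpow_alt bases exponents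
instance (bases : List Int) (exponents : List (List Int)) (out : List Int) : Decidable (Spec_prodpow bases exponents out) := by unfold Spec_prodpow; infer_instance

-- ===== CLAIM (what is proved, stated in full; the proofs are below) =====
def Claim_equal_prodpow : Prop := ∀ (bases : List Int) (exponents : List (List Int)), Dom_prodpow bases exponents → Pre_prodpow bases exponents → Spec_prodpow bases exponents (prodpow bases exponents)

-- ===== LEMMAS AND PROOFS =====

-- state of B's sweep zipped back with exponents, in map form
theorem prodpow_zip_map_self {α β : Type} (l : List α) (g : α → β) :
    (l.map g).zip l = l.map (fun x => (g x, x)) := by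
  induction l with
  | nil => rfl
  | cons x xs ih => simp [ih]

-- B's column sweep keeps the state in the shape `exponents.map g`: one column step, then
-- a whole list of column indices.
theorem prodpow_fold_cols (bases : List Int) (exps : List (List Int)) (js : List Nat)
    (g : List Int → Int) :
    js.foldl
      (fun result j =>
        (result.zip exps).map
          (fun p => if j < p.2.length then p.1 * (bases.getD j 0) ^ ((p.2.getD j 0).toNat) else p.1))
      (exps.map g)
    = exps.map (fun row =>
        js.foldl
          (fun r j => if j < row.length then r * (bases.getD j 0) ^ ((row.getD j 0).toNat) else r)
          (g row)) := by
  induction js generalizing g with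
  | nil => simp
  | cons j js ih =>
    simp only [List.foldl_cons]
    rw [prodpow_zip_map_self, List.map_map]
    exact ih _

-- The per-row column fold with the in-range guard is exactly A's zip fold.
theorem prodpow_col_eq_row (bases : List Int) (row : List Int) (acc : Int) :
    (List.range bases.length).foldl
      (fun r j => if j < row.length then r * (bases.getD j 0) ^ ((row.getD j 0).toNat) else r)
      acc
    = (bases.zip row).foldl (fun res p => res * p.1 ^ p.2.toNat) acc := by
  induction bases generalizing row acc with
  | nil => simp
  | cons b bs ih =>
    cases row with
    | nil =>
      simp [List.range_succ_eq_map, List.foldl_map]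
    | cons e es =>
      simp only [List.length_cons, List.range_succ_eq_map, List.foldl_cons, List.foldl_map,
        List.zip_cons_cons]
      simp only [Nat.zero_lt_succ, if_pos, List.getD_cons_zero, List.getD_cons_succ,
        Nat.succ_lt_succ_iff]
      exact ih es _

-- columns past the row's length leave the accumulator unchanged
theorem prodpow_fold_noop (bases row : List Int) (js : List Nat) (acc : Int)
    (h : ∀ j ∈ js, ¬ j < row.length) :
    js.foldl
      (fun r j => if j < row.length then r * (bases.getD j 0) ^ ((row.getD j 0).toNat) else r)
      acc = acc := by
  induction js generalizing acc with
  | nil => rfl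
  | cons j js ih =>
    simp only [List.foldl_cons, if_neg (h j (List.mem_cons_self))]
    exact ih _ fun k hk => h k (List.mem_cons_of_mem _ hk)

-- the column fold may stop at any bound that already covers the row
theorem prodpow_fold_range_ext (bases row : List Int) (m n : Nat) (hm : row.length ≤ m)
    (hmn : m ≤ n) (acc : Int) :
    (List.range n).foldl
      (fun r j => if j < row.length then r * (bases.getD j 0) ^ ((row.getD j 0).toNat) else r)
      acc
    = (List.range m).foldl
      (fun r j => if j < row.length then r * (bases.getD j 0) ^ ((row.getD j 0).toNat) else r)
      acc := by
  obtain ⟨k, rfl⟩ := Nat.exists_eq_add_of_le hmn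
  rw [List.range_add, List.foldl_append, prodpow_fold_noop]
  intro j hj
  obtain ⟨x, _, rfl⟩ := List.mem_map.mp hj
  omega

theorem prodpow_foldl_max_mono (l : List (List Int)) (a : Nat) :
    a ≤ l.foldl (fun m r => max m r.length) a := by
  induction l generalizing a with
  | nil => simp
  | cons x xs ih => exact le_trans (le_max_left _ _) (ih _)

theorem prodpow_le_foldl_max (l : List (List Int)) (row : List Int) (h : row ∈ l) (a : Nat) :
    row.length ≤ l.foldl (fun m r => max m r.length) a := by
  induction l generalizing a with
  | nil => cases h
  | cons x xs ih =>
    rcases List.mem_cons.mp h with rfl | h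
    · exact le_trans (le_max_right _ _) (prodpow_foldl_max_mono xs _)
    · exact ih h _

-- ===== VERDICT (by name: the statement is the Claim_ definition above) =====
theorem prodpow_spec : Claim_equal_prodpow := by
  intro bases exponents _ _
  unfold Spec_prodpow prodpow prodpow_alt
  rw [PySem.List.foldl_append_singleton_eq_map, prodpow_fold_cols]
  refine List.map_congr_left fun row hrow => ?_
  rw [← prodpow_col_eq_row bases row 1]
  rcases Nat.le_total bases.length (exponents.foldl (fun m r => max m r.length) 0) with h | h
  · rw [Nat.min_eq_left h]
  · rw [Nat.min_eq_right h]
    exact prodpow_fold_range_ext bases row _ _ (prodpow_le_foldl_max exponents row hrow 0) h 1
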